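-- pv_equiv track=rewrite | github.com/DragonZ2013/Sem1_FP | Seminar3-3/main.py | Switchvoc
-- ===== SOURCE A (Python) =====
-- def Switchvoc(cuv):
--     i=0
--     j=len(cuv)-1
--     l=list(cuv)
--     while(i<j):
--         if l[i] not in "AEOIUaeiou":
--             i+=1
--         if l[j] not in "AEOIUaeiou":
--             j-=1
--         if l[j] in "AEOIUaeiou" and l[i] in "AEOIUaeiou":
--             l[j],l[i]=l[i],l[j]
--             i+=1
--             j-=1
--     return "".join(l)
-- ===== SOURCE B (Python) =====
-- def Switchvoc(cuv):
--     rv = iter([c for c in cuv if c in "AEOIUaeiou"][::-1])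
--     return "".join(next(rv) if c in "AEOIUaeiou" else c for c in cuv)
-- ===== Notes on version B (the rewrite author's own statement) =====
-- stated objective: idiomatic
-- what changed: Replaces the in-place two-pointer vowel swap with a single extract-reverse-reinsert pass: collect the vowels, reverse them, and re-emit them in order while copying non-vowels unchanged.
import Mathlib
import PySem

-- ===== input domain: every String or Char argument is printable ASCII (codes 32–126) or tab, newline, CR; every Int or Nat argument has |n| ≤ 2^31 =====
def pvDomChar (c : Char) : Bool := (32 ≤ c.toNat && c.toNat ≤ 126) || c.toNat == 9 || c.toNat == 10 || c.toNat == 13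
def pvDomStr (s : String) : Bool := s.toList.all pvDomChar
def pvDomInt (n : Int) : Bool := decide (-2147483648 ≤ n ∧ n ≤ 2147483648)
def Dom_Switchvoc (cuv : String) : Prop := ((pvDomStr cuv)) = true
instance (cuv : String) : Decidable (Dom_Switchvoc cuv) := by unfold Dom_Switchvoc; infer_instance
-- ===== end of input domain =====

-- B replaces A's in-place two-pointer vowel swap by an extract-reverse-reinsert pass (same O(n) cost, more idiomatic).

-- ===== PORT A =====
-- shared helper: the membership test `c in "AEOIUaeiou"` both Pythons use
def isVowel (c : Char) : Bool := "AEOIUaeiou".toList.contains c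

-- `if l[i] not in V: i+=1` / `if l[j] not in V: j-=1` (indices stay in range, so getD is exact)
def stepI (l : List Char) (i : Nat) : Nat := if isVowel (l.getD i ' ') then i else i + 1
def stepJ (l : List Char) (j : Nat) : Nat := if isVowel (l.getD j ' ') then j else j - 1

-- A's while loop, step for step; i and j never go negative nor out of range, so Nat indices are exact
def loopA (l : List Char) (i j : Nat) : List Char :=
  if _h : i < j then
    if isVowel (l.getD (stepJ l j) ' ') && isVowel (l.getD (stepI l i) ' ') then
      loopA ((l.set (stepJ l j) (l.getD (stepI l i) ' ')).set (stepI l i) (l.getD (stepJ l j) ' '))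
        (stepI l i + 1) (stepJ l j - 1)
    else
      loopA l (stepI l i) (stepJ l j)
  else l
termination_by j - i
decreasing_by
  · unfold stepI stepJ; split_ifs <;> omega
  · rename_i hc
    simp only [Bool.and_eq_true] at hc
    unfold stepI stepJ at hc ⊢
    split_ifs at hc ⊢ with h1 h2
    case _ => exact absurd ⟨h1, h2⟩ hc
    all_goals omega

def Switchvoc (cuv : String) : String :=
  String.ofList (loopA cuv.toList 0 (cuv.toList.length - 1))

-- ===== PORT B =====
-- `"".join(next(rv) if c in V else c for c in cuv)`: consume the reversed vowel list front-first.
-- The `[] => c :: …` branch is unreachable when r holds exactly one char per vowel of s.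
def emitB : List Char → List Char → List Char
  | [], _ => []
  | c :: s, r =>
    if isVowel c then
      match r with
      | x :: r' => x :: emitB s r'
      | [] => c :: emitB s []
    else c :: emitB s r

def Switchvoc_alt (cuv : String) : String :=
  String.ofList (emitB cuv.toList ((cuv.toList.filter isVowel).reverse))

-- ===== PRECONDITION & SPEC =====
def Spec_Switchvoc (cuv : String) (out : String) : Prop := out = Switchvoc_alt cuv
instance (cuv : String) (out : String) : Decidable (Spec_Switchvoc cuv out) := by unfold Spec_Switchvoc; infer_instance

-- ===== CLAIM (what is proved, stated in full; the proofs are below) =====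
def Claim_equal_Switchvoc : Prop := ∀ (cuv : String), Dom_Switchvoc cuv → Spec_Switchvoc cuv (Switchvoc cuv)

-- ===== LEMMAS AND PROOFS =====

-- B's result on a list s: reinsert the reversed vowel subsequence
def Rv (s : List Char) : List Char := emitB s (s.filter isVowel).reverse

-- the sublist of positions i..j (inclusive)
def seg (l : List Char) (i j : Nat) : List Char := (l.drop i).take (j + 1 - i)

-- A's loop invariant shape: outside [i,j] the list is final, inside the vowels will be reversed
def Tt (l : List Char) (i j : Nat) : List Char := l.take i ++ Rv (seg l i j) ++ l.drop (j + 1)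

theorem emit_append (s t r r' : List Char) (h : r.length = (s.filter isVowel).length) :
    emitB (s ++ t) (r ++ r') = emitB s r ++ emitB t r' := by
  induction s generalizing r with
  | nil =>
    simp only [List.filter_nil, List.length_nil, List.length_eq_zero_iff] at h
    subst h; simp [emitB]
  | cons c s ih =>
    by_cases hv : isVowel c = true
    · simp only [List.filter_cons, hv, if_pos, List.length_cons] at h
      cases r with
      | nil => simp at h
      | cons x r2 =>
        simp only [List.length_cons, Nat.add_right_cancel_iff] at h
        simp [emitB, hv, ih r2 h]
    · simp only [List.filter_cons, hv, Bool.false_eq_true] at h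
      simp [emitB, hv, ih r h]

theorem Rv_nil : Rv [] = [] := by simp [Rv, emitB]

theorem Rv_cons_nonv (c : Char) (s : List Char) (h : ¬ isVowel c = true) :
    Rv (c :: s) = c :: Rv s := by
  simp [Rv, h, emitB]

theorem Rv_single (c : Char) : Rv [c] = [c] := by
  by_cases h : isVowel c = true <;> simp [Rv, h, emitB]

theorem Rv_snoc_nonv (c : Char) (s : List Char) (h : ¬ isVowel c = true) :
    Rv (s ++ [c]) = Rv s ++ [c] := by
  have hf : (s ++ [c]).filter isVowel = s.filter isVowel := by
    simp [List.filter_append, h]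
  have := emit_append s [c] ((s.filter isVowel).reverse) []
    (by simp)
  simp only [List.append_nil] at this
  simp [Rv, hf, this, emitB, h]

theorem Rv_wrap (a b : Char) (s : List Char) (ha : isVowel a = true) (hb : isVowel b = true) :
    Rv (a :: (s ++ [b])) = b :: (Rv s ++ [a]) := by
  have hf : (a :: (s ++ [b])).filter isVowel = a :: ((s.filter isVowel) ++ [b]) := by
    simp [List.filter_append, ha, hb]
  have hrev : (a :: ((s.filter isVowel) ++ [b])).reverse
      = b :: ((s.filter isVowel).reverse ++ [a]) := by
    simp
  have happ := emit_append s [b] ((s.filter isVowel).reverse) [a] (by simp)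
  simp only [Rv, hf, hrev]
  simp [emitB, ha, hb, happ]

theorem seg_single (l : List Char) (i : Nat) (hi : i < l.length) : seg l i i = [l[i]] := by
  have h1 : i + 1 - i = 1 := by omega
  rw [seg, h1, List.drop_eq_getElem_cons hi]
  rfl

theorem seg_cons (l : List Char) (i j : Nat) (hij : i ≤ j) (hi : i < l.length) :
    seg l i j = l[i] :: seg l (i + 1) j := by
  have h1 : j + 1 - i = (j + 1 - (i + 1)) + 1 := by omega
  rw [seg, h1, List.drop_eq_getElem_cons hi, List.take_succ_cons, seg]

theorem seg_snoc (l : List Char) (i j : Nat) (hij : i ≤ j) (h1 : 1 ≤ j) (hj : j < l.length) :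
    seg l i j = seg l i (j - 1) ++ [l[j]] := by
  have h1 : j + 1 - i = (j - i) + 1 := by omega
  have h2 : (j - 1) + 1 - i = j - i := by omega
  have hlt : j - i < (l.drop i).length := by simp; omega
  rw [seg, seg, h1, h2, List.take_succ_eq_append_getElem hlt]
  congr 2
  rw [List.getElem_drop]
  congr 1
  omega

theorem decomp (l : List Char) (i j : Nat) (hij : i ≤ j) (hj : j < l.length) :
    l = l.take i ++ seg l i j ++ l.drop (j + 1) := by
  have h1 : i + (j + 1 - i) = j + 1 := by omega
  rw [seg, ← List.take_add, h1, List.take_append_drop]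

theorem T_single (l : List Char) (i : Nat) (hi : i < l.length) : Tt l i i = l := by
  rw [Tt, seg_single l i hi, Rv_single, ← List.take_succ_eq_append_getElem hi, List.take_append_drop]

theorem T_peel_front (l : List Char) (i j : Nat) (hij : i < j) (hj : j < l.length)
    (h : ¬ isVowel (l.getD i ' ') = true) : Tt l i j = Tt l (i + 1) j := by
  have hi : i < l.length := by omega
  rw [List.getD_eq_getElem l ' ' hi] at h
  rw [Tt, Tt, seg_cons l i j (by omega) hi, Rv_cons_nonv _ _ h]
  have ht : List.take (i + 1) l = List.take i l ++ [l[i]] :=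
    List.take_succ_eq_append_getElem hi
  rw [ht]
  simp only [List.append_assoc, List.singleton_append]

theorem T_peel_back (l : List Char) (i j : Nat) (hij : i < j) (hj : j < l.length)
    (h : ¬ isVowel (l.getD j ' ') = true) : Tt l i j = Tt l i (j - 1) := by
  rw [List.getD_eq_getElem l ' ' hj] at h
  have hd : l.drop ((j - 1) + 1) = l[j] :: l.drop (j + 1) := by
    have : (j - 1) + 1 = j := by omega
    rw [this, List.drop_eq_getElem_cons hj]
  rw [Tt, Tt, seg_snoc l i j (by omega) (by omega) hj, Rv_snoc_nonv _ _ h, hd]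
  simp

theorem seg_len (l : List Char) (i j : Nat) (hj : j < l.length) :
    (seg l i j).length = j + 1 - i := by
  simp [seg]
  omega

theorem swap_decomp (l : List Char) (i j : Nat) (hij : i < j) (hj : j < l.length) :
    (l.set j (l.getD i ' ')).set i (l.getD j ' ')
      = l.take i ++ (l.getD j ' ') :: (seg l (i + 1) (j - 1) ++ (l.getD i ' ') :: l.drop (j + 1)) := by
  have hi : i < l.length := by omega
  rw [List.getD_eq_getElem l ' ' hi, List.getD_eq_getElem l ' ' hj]
  generalize ha : l[i]'hi = a
  generalize hb : l[j]'hj = b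
  have hX : (l.take i).length = i := by simp; omega
  have hM : (seg l (i + 1) (j - 1)).length = j - i - 1 := by
    rw [seg_len l (i + 1) (j - 1) (by omega)]; omega
  have hdec : l = l.take i ++ (a :: (seg l (i + 1) (j - 1) ++ (b :: l.drop (j + 1)))) := by
    have h0 := decomp l i j (by omega) hj
    rw [seg_cons l i j (by omega) hi, seg_snoc l (i + 1) j (by omega) (by omega) hj,
      ha, hb] at h0
    simpa [List.append_assoc] using h0
  conv_lhs => rw [hdec]
  rw [List.set_append_right _ _ (by omega), hX]
  rw [List.set_append_right _ _ (by omega), hX]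
  have hji : j - i = (j - i - 1) + 1 := by omega
  rw [hji, List.set_cons_succ, Nat.sub_self, List.set_cons_zero]
  rw [List.set_append_right _ _ (by omega), hM, Nat.sub_self, List.set_cons_zero]

theorem T_wrap (l : List Char) (i j : Nat) (hij : i < j) (hj : j < l.length)
    (hvi : isVowel (l.getD i ' ') = true) (hvj : isVowel (l.getD j ' ') = true) :
    Tt l i j = l.take i ++ (l.getD j ' ') ::
      (Rv (seg l (i + 1) (j - 1)) ++ (l.getD i ' ') :: l.drop (j + 1)) := by
  have hi : i < l.length := by omega
  rw [List.getD_eq_getElem l ' ' hi, List.getD_eq_getElem l ' ' hj] at *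
  have hseg : seg l i j = l[i] :: (seg l (i + 1) (j - 1) ++ [l[j]]) := by
    rw [seg_cons l i j (by omega) hi, seg_snoc l (i + 1) j (by omega) (by omega) hj]
  rw [Tt, hseg, Rv_wrap _ _ _ hvi hvj]
  simp

theorem T_of_parts (i j : Nat) (X M Z : List Char) (a b : Char)
    (hij : i + 2 ≤ j) (hX : X.length = i) (hM : M.length = j - i - 1) :
    Tt (X ++ b :: (M ++ a :: Z)) (i + 1) (j - 1) = X ++ b :: (Rv M ++ a :: Z) := by
  have htake : (X ++ b :: (M ++ a :: Z)).take (i + 1) = X ++ [b] := by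
    have h2 : i + 1 = X.length + 1 := by omega
    rw [h2, List.take_length_add_append]
    rfl
  have hdropM : (X ++ b :: (M ++ a :: Z)).drop (i + 1) = M ++ a :: Z := by
    have h2 : i + 1 = X.length + 1 := by omega
    rw [h2, List.drop_length_add_append]
    rfl
  have hseg : seg (X ++ b :: (M ++ a :: Z)) (i + 1) (j - 1) = M := by
    rw [seg, hdropM]
    have h2 : j - 1 + 1 - (i + 1) = M.length := by omega
    rw [h2, List.take_left]
  have hdrop : (X ++ b :: (M ++ a :: Z)).drop (j - 1 + 1) = a :: Z := by
    have h2 : j - 1 + 1 = X.length + (M.length + 1) := by omega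
    rw [h2, List.drop_length_add_append]
    show (b :: (M ++ a :: Z)).drop (M.length + 1) = a :: Z
    rw [List.drop_succ_cons, List.drop_left]
  rw [Tt, htake, hseg, hdrop]
  simp

theorem bothv (n : Nat)
    (IH : ∀ (l : List Char) (i j : Nat), j - i ≤ n → i ≤ j → j < l.length → loopA l i j = Tt l i j)
    (l : List Char) (i j : Nat) (hij : i < j) (hj : j < l.length) (hn : j - i ≤ n + 1)
    (hvi : isVowel (l.getD i ' ') = true) (hvj : isVowel (l.getD j ' ') = true) :
    loopA ((l.set j (l.getD i ' ')).set i (l.getD j ' ')) (i + 1) (j - 1) = Tt l i j := by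
  have hi : i < l.length := by omega
  have hl' := swap_decomp l i j hij hj
  have hX : (l.take i).length = i := by simp; omega
  have hM : (seg l (i + 1) (j - 1)).length = j - i - 1 := by
    rw [seg_len l (i + 1) (j - 1) (by omega)]; omega
  have hZ : (l.drop (j + 1)).length = l.length - (j + 1) := by simp
  rcases Nat.lt_or_ge (i + 1) j with hcase | hcase
  · -- j ≥ i + 2 : IH applies to the recursive call
    rw [hl', IH _ (i + 1) (j - 1) (by omega) (by omega)
        (by simp only [List.length_append, List.length_cons, hX, hM, hZ]; omega),
      T_of_parts i j _ _ _ _ _ (by omega) hX hM, T_wrap l i j hij hj hvi hvj]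
  · -- j = i + 1 : the recursive call exits immediately
    have hj1 : j = i + 1 := by omega
    rw [loopA, dif_neg (by omega), hl', T_wrap l i j hij hj hvi hvj]
    have hMnil : seg l (i + 1) (j - 1) = [] := by
      rw [seg, hj1]
      simp
    rw [hMnil, Rv_nil]

theorem set_noop (l : List Char) (k : Nat) (hk : k < l.length) :
    (l.set k (l.getD k ' ')).set k (l.getD k ' ') = l := by
  rw [List.set_set, List.getD_eq_getElem l ' ' hk, List.set_getElem_self]

theorem loopA_eq_T (n : Nat) : ∀ (l : List Char) (i j : Nat), j - i ≤ n → i ≤ j →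
    j < l.length → loopA l i j = Tt l i j := by
  induction n with
  | zero =>
    intro l i j hn hij hj
    have heq : i = j := by omega
    subst heq
    rw [loopA, dif_neg (by omega), T_single l i hj]
  | succ n ih =>
    intro l i j hn hij hj
    rcases Nat.eq_or_lt_of_le hij with heq | hlt
    · subst heq
      rw [loopA, dif_neg (by omega), T_single l i hj]
    have hi : i < l.length := by omega
    rw [loopA, dif_pos hlt]
    by_cases hvi : isVowel (l.getD i ' ') = true <;>
      by_cases hvj : isVowel (l.getD j ' ') = true
    · -- both ends vowels: swap
      have hsi : stepI l i = i := by rw [stepI, if_pos hvi]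
      have hsj : stepJ l j = j := by rw [stepJ, if_pos hvj]
      rw [hsi, hsj, if_pos (by rw [hvj, hvi]; rfl)]
      exact bothv n ih l i j hlt hj (by omega) hvi hvj
    · -- left vowel, right not: j moves to j-1
      have hsi : stepI l i = i := by rw [stepI, if_pos hvi]
      have hsj : stepJ l j = j - 1 := by rw [stepJ, if_neg hvj]
      rw [hsi, hsj, T_peel_back l i j hlt hj hvj]
      by_cases hd : j - 1 = i
      · rw [hd, if_pos (by rw [hvi]; rfl), set_noop l i hi, loopA, dif_neg (by omega),
          T_single l i hi]
      · by_cases hv2 : isVowel (l.getD (j - 1) ' ') = true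
        · rw [if_pos (by rw [hv2, hvi]; rfl)]
          exact bothv n ih l i (j - 1) (by omega) (by omega) (by omega) hvi hv2
        · rw [if_neg (by simp only [Bool.and_eq_true]; exact fun h => hv2 h.1)]
          exact ih l i (j - 1) (by omega) (by omega) (by omega)
    · -- right vowel, left not: i moves to i+1
      have hsi : stepI l i = i + 1 := by rw [stepI, if_neg hvi]
      have hsj : stepJ l j = j := by rw [stepJ, if_pos hvj]
      rw [hsi, hsj, T_peel_front l i j hlt hj hvi]
      by_cases hd : i + 1 = j
      · rw [hd, if_pos (by rw [hvj]; rfl), set_noop l j hj, loopA, dif_neg (by omega),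
          T_single l j hj]
      · by_cases hv2 : isVowel (l.getD (i + 1) ' ') = true
        · rw [if_pos (by rw [hvj, hv2]; rfl)]
          exact bothv n ih l (i + 1) j (by omega) hj (by omega) hv2 hvj
        · rw [if_neg (by simp only [Bool.and_eq_true]; exact fun h => hv2 h.2)]
          exact ih l (i + 1) j (by omega) (by omega) hj
    · -- neither end a vowel: both pointers move
      have hsi : stepI l i = i + 1 := by rw [stepI, if_neg hvi]
      have hsj : stepJ l j = j - 1 := by rw [stepJ, if_neg hvj]
      rw [hsi, hsj, T_peel_front l i j hlt hj hvi]
      by_cases hd : i + 1 = j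
      · rw [if_neg (by simp only [Bool.and_eq_true]; exact fun h => hvj (hd ▸ h.2)),
          loopA, dif_neg (by omega), hd, T_single l j hj]
      have hlt2 : i + 1 < j := by omega
      rw [T_peel_back l (i + 1) j hlt2 hj hvj]
      by_cases hd2 : i + 1 = j - 1
      · by_cases hv2 : isVowel (l.getD (i + 1) ' ') = true
        · rw [if_pos (by rw [← hd2, hv2]; rfl),
            ← hd2, set_noop l (i + 1) (by omega), loopA, dif_neg (by omega),
            T_single l (i + 1) (by omega)]
        · rw [if_neg (by simp only [Bool.and_eq_true]; exact fun h => hv2 h.2),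
            loopA, dif_neg (by omega), ← hd2, T_single l (i + 1) (by omega)]
      · by_cases hv2 : isVowel (l.getD (j - 1) ' ') = true
        · by_cases hv3 : isVowel (l.getD (i + 1) ' ') = true
          · rw [if_pos (by rw [hv2, hv3]; rfl)]
            exact bothv n ih l (i + 1) (j - 1) (by omega) (by omega) (by omega) hv3 hv2
          · rw [if_neg (by simp only [Bool.and_eq_true]; exact fun h => hv3 h.2)]
            exact ih l (i + 1) (j - 1) (by omega) (by omega) (by omega)
        · rw [if_neg (by simp only [Bool.and_eq_true]; exact fun h => hv2 h.1)]
          exact ih l (i + 1) (j - 1) (by omega) (by omega) (by omega)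

theorem switch_main (l : List Char) : loopA l 0 (l.length - 1) = Rv l := by
  cases l with
  | nil =>
    rw [loopA, dif_neg (by simp), Rv_nil]
  | cons c t =>
    rw [loopA_eq_T ((c :: t).length) (c :: t) 0 ((c :: t).length - 1) (by omega) (by omega)
        (by simp), Tt]
    have hseg : seg (c :: t) 0 ((c :: t).length - 1) = c :: t := by
      rw [seg]
      have h2 : (c :: t).length - 1 + 1 - 0 = (c :: t).length := by simp
      rw [h2, List.drop_zero, List.take_length]
    have hdrop : (c :: t).drop ((c :: t).length - 1 + 1) = [] := by
      apply List.drop_eq_nil_of_le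
      simp
    rw [hseg, hdrop, List.take_zero, List.nil_append, List.append_nil]

-- ===== VERDICT (by name: the statement is the Claim_ definition above) =====
theorem Switchvoc_spec : Claim_equal_Switchvoc := by
  intro cuv _
  unfold Spec_Switchvoc Switchvoc Switchvoc_alt
  rw [switch_main]
  rfl
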